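-- pv_equiv track=rewrite | github.com/ktnguyenx/resume-keyword-analyzer | src/scorer.py | find_concept_locations
-- ===== SOURCE A (Python) =====
-- def find_concept_locations(
--     matched_concepts: set[str],
--     resume_section_concepts: dict[str, set[str]],
-- ) -> dict[str, list[str]]:
--     concept_locations = {}
--
--     for concept in matched_concepts:
--         locations = [
--             section_name
--             for section_name, concepts in resume_section_concepts.items()
--             if concept in concepts
--         ]
--         concept_locations[concept] = sorted(locations)
--
--     return concept_locations
-- ===== SOURCE B (Python) =====
-- def find_concept_locations(
--     matched_concepts: set[str],
--     resume_section_concepts: dict[str, set[str]],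
-- ) -> dict[str, list[str]]:
--     # Single pass over the sections: bucket every concept by the sections
--     # that contain it, then read off the (sorted) bucket of each matched concept.
--     buckets = {}
--     for section_name, concepts in resume_section_concepts.items():
--         for concept in concepts:
--             buckets.setdefault(concept, []).append(section_name)
--     return {concept: sorted(buckets.get(concept, [])) for concept in matched_concepts}
-- ===== Notes on version B (the rewrite author's own statement) =====
-- stated objective: faster
-- what changed: Replaces A's nested scan (for each matched concept, rescan every section) with a single pass over the sections that buckets each concept's section names in a dict, then looks each matched concept's bucket up.
import Mathlib
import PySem

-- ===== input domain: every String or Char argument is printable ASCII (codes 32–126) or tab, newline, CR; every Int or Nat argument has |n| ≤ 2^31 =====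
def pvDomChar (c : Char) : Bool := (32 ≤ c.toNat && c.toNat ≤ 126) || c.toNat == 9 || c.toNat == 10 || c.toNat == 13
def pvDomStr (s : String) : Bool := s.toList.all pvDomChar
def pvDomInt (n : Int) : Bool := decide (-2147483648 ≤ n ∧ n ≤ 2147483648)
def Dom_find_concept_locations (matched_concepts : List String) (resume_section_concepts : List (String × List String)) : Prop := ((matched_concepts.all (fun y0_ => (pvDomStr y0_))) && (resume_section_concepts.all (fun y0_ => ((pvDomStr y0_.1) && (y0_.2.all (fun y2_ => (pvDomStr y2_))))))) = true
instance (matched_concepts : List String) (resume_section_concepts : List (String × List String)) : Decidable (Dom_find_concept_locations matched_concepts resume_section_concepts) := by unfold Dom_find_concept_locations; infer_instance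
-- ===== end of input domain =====

-- B replaces A's nested scan (each matched concept rescans every section) with one bucketing
-- pass over the sections followed by per-concept lookups (objective: faster).
-- Both sides build dicts keyed by Python-set iteration, whose order Python leaves open; the ports
-- iterate the given list order, identically on both sides.

-- ===== PORT A =====
-- for concept in matched_concepts: locations = [s for s, cs in items if concept in cs];
-- concept_locations[concept] = sorted(locations)
def find_concept_locations (matched_concepts : List String) (resume_section_concepts : List (String × List String)) : List (String × List String) :=
  (matched_concepts.foldl
    (fun concept_locations concept =>
      let locations := (resume_section_concepts.filter (fun p => p.2.contains concept)).map (·.1)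
      PySem.Dict.insert concept_locations concept (PySem.List.sorted locations (fun x => x) false))
    PySem.Dict.empty).items

-- ===== PORT B =====
-- one pass: buckets.setdefault(concept, []).append(section_name); then
-- {c: sorted(buckets.get(c, [])) for c in matched_concepts}.
-- 'concepts' is a Python set, so the inner loop runs over its distinct elements (PySem.Set.ofList).
def find_concept_locations_alt (matched_concepts : List String) (resume_section_concepts : List (String × List String)) : List (String × List String) :=
  let buckets := resume_section_concepts.foldl
    (fun buckets p =>
      (PySem.Set.ofList p.2).foldl
        (fun buckets concept => PySem.Dict.modify buckets concept [] (· ++ [p.1])) buckets)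
    PySem.Dict.empty
  (matched_concepts.foldl
    (fun d concept =>
      PySem.Dict.insert d concept (PySem.List.sorted (PySem.Dict.getD buckets concept []) (fun x => x) false))
    PySem.Dict.empty).items

-- ===== PRECONDITION & SPEC =====
def Spec_find_concept_locations (matched_concepts : List String) (resume_section_concepts : List (String × List String)) (out : List (String × List String)) : Prop := out = find_concept_locations_alt matched_concepts resume_section_concepts
instance (matched_concepts : List String) (resume_section_concepts : List (String × List String)) (out : List (String × List String)) : Decidable (Spec_find_concept_locations matched_concepts resume_section_concepts out) := by unfold Spec_find_concept_locations; infer_instance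

-- ===== CLAIM (what is proved, stated in full; the proofs are below) =====
def Claim_equal_find_concept_locations : Prop := ∀ (matched_concepts : List String) (resume_section_concepts : List (String × List String)), Dom_find_concept_locations matched_concepts resume_section_concepts → Spec_find_concept_locations matched_concepts resume_section_concepts (find_concept_locations matched_concepts resume_section_concepts)

-- ===== LEMMAS AND PROOFS =====

-- On a duplicate-free list, filtering for equality with c keeps exactly one c (or none).
theorem filter_eq_of_nodup (cs : List String) (c : String) (h : cs.Nodup) :
    cs.filter (fun x => x == c) = if c ∈ cs then [c] else [] := by
  induction cs with
  | nil => simp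
  | cons a t ih =>
    rcases List.nodup_cons.mp h with ⟨ha, ht⟩
    by_cases hac : a = c
    · subst hac
      simp [ih ht, ha]
    · simp only [List.filter_cons, ih ht]
      have : ¬ c = a := fun h' => hac h'.symm
      simp [this, hac]

-- The inner loop of B's bucketing pass: appending section s to the bucket of every concept
-- of a duplicate-free list cs touches bucket c exactly when c ∈ cs.
theorem getD_inner_fill (cs : List String) (s : String) (d : PySem.Dict String (List String))
    (h : cs.Nodup) (c : String) :
    (cs.foldl (fun d c' => PySem.Dict.modify d c' [] (· ++ [s])) d).getD c []
      = d.getD c [] ++ (if c ∈ cs then [s] else []) := by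
  have hmap : cs.foldl (fun d c' => PySem.Dict.modify d c' [] (· ++ [s])) d
      = ((cs.map (fun c' => (c', s))).foldl (fun d p => PySem.Dict.modify d p.1 [] (· ++ [p.2])) d) := by
    rw [List.foldl_map]
  rw [hmap, PySem.Dict.getD_foldl_modify_append, List.filter_map]
  have : (cs.filter ((fun p => p.1 == c) ∘ (fun c' => (c', s)))) = cs.filter (fun x => x == c) := rfl
  rw [this, filter_eq_of_nodup cs c h]
  by_cases hc : c ∈ cs <;> simp [hc]

-- The whole bucketing pass: bucket c collects, in order, the names of the sections containing c.
theorem getD_buckets (rsc : List (String × List String)) (d : PySem.Dict String (List String)) (c : String) :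
    (rsc.foldl
        (fun buckets p =>
          (PySem.Set.ofList p.2).foldl
            (fun buckets concept => PySem.Dict.modify buckets concept [] (· ++ [p.1])) buckets)
        d).getD c []
      = d.getD c [] ++ (rsc.filter (fun p => p.2.contains c)).map (·.1) := by
  induction rsc generalizing d with
  | nil => simp
  | cons p t ih =>
    rw [List.foldl_cons, ih, List.filter_cons]
    rw [getD_inner_fill (PySem.Set.ofList p.2) p.1 d (PySem.Set.nodup_ofList p.2) c]
    have hmem : (c ∈ PySem.Set.ofList p.2) ↔ c ∈ p.2 := (PySem.Set.mem_ofList p.2 c)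
    by_cases hc : c ∈ p.2
    · simp [hmem, hc, List.contains_eq_mem, List.append_assoc]
    · simp [hmem, hc, List.contains_eq_mem]

-- ===== VERDICT (by name: the statement is the Claim_ definition above) =====
theorem find_concept_locations_spec : Claim_equal_find_concept_locations := by
  intro matched_concepts rsc _
  unfold Spec_find_concept_locations find_concept_locations find_concept_locations_alt
  congr 2
  funext d concept
  rw [getD_buckets rsc PySem.Dict.empty concept]
  simp
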